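-- pv_equiv track=rewrite | github.com/Parthsarthi99/python-mini-challenges | code.py | k_distinct
-- ===== SOURCE A (Python) =====
-- def k_distinct(string, k):
--     string = string.lower()
--     unique = []
--     for i in string:
--         if i not in unique:
--             unique.append(i)
--
--     if(k == len(unique)):
--         return True
--     else:
--         return False
-- ===== SOURCE B (Python) =====
-- def k_distinct(string, k):
--     chars = sorted(string.lower())
--     count = 0
--     prev = None
--     for c in chars:
--         if c != prev:
--             count += 1
--             prev = c
--     return k == count
-- ===== Notes on version B (the rewrite author's own statement) =====
-- stated objective: alternative
-- what changed: Replaces A's quadratic membership-test dedup loop with sort-then-count-runs: lowercase, sort the characters, count boundaries between adjacent runs in one pass, and compare that run count with k.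
import Mathlib
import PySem

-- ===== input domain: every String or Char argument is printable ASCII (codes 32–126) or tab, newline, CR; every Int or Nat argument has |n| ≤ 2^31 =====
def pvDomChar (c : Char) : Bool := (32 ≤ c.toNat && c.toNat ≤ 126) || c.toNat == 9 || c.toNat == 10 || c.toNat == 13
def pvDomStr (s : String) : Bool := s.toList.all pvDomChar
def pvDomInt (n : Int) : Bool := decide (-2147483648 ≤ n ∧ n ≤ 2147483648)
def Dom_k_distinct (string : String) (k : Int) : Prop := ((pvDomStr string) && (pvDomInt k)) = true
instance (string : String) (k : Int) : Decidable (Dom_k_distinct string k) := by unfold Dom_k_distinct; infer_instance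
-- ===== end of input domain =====

-- B replaces A's membership-test dedup loop with sort-then-count-runs over the lowercased characters; alternative algorithm, same results.


-- ===== PORT A =====
def k_distinct (string : String) (k : Int) : Bool :=
  let s := PySem.Chars.lower string.toList
  let unique := s.foldl (fun u i => if i ∈ u then u else u ++ [i]) ([] : List Char)
  if k == (unique.length : Int) then true else false

-- ===== PORT B =====
def k_distinct_alt (string : String) (k : Int) : Bool :=
  let chars := PySem.List.sorted (PySem.Chars.lower string.toList) (fun c => c) false
  let st := chars.foldl
    (fun (st : Int × Option Char) c => if some c ≠ st.2 then (st.1 + 1, some c) else st)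
    ((0 : Int), (none : Option Char))
  k == st.1

-- ===== PRECONDITION & SPEC =====
def Spec_k_distinct (string : String) (k : Int) (out : Bool) : Prop := out = k_distinct_alt string k
instance (string : String) (k : Int) (out : Bool) : Decidable (Spec_k_distinct string k out) := by unfold Spec_k_distinct; infer_instance

-- ===== CLAIM (what is proved, stated in full; the proofs are below) =====
def Claim_equal_k_distinct : Prop := ∀ (string : String) (k : Int), Dom_k_distinct string k → Spec_k_distinct string k (k_distinct string k)

-- ===== LEMMAS AND PROOFS =====

-- A's dedup loop: the accumulator stays duplicate-free and collects exactly the elements seen.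
theorem foldA_spec (l u : List Char) (hu : u.Nodup) :
    (l.foldl (fun u i => if i ∈ u then u else u ++ [i]) u).Nodup ∧
    (l.foldl (fun u i => if i ∈ u then u else u ++ [i]) u).toFinset = u.toFinset ∪ l.toFinset := by
  induction l generalizing u with
  | nil => simpa using hu
  | cons a t ih =>
    by_cases h : a ∈ u
    · have := ih u hu
      simp only [List.foldl_cons, if_pos h]
      refine ⟨this.1, ?_⟩
      have ha : a ∈ u.toFinset := by simpa using h
      rw [this.2, List.toFinset_cons, Finset.union_insert,
        Finset.insert_eq_self.mpr (Finset.mem_union_left _ ha)]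
    · have hu' : (u ++ [a]).Nodup :=
        List.Nodup.append hu (List.nodup_singleton a)
          (fun x hx hxa => h ((List.mem_singleton.mp hxa) ▸ hx))
      have := ih (u ++ [a]) hu'
      simp only [List.foldl_cons, if_neg h]
      refine ⟨this.1, ?_⟩
      rw [this.2]
      ext x
      simp only [Finset.mem_union, List.toFinset_append, List.toFinset_cons, List.toFinset_nil,
        Finset.mem_insert]
      tauto

-- card (insert a s) = card (s.erase a) + 1, both when a ∈ s and when a ∉ s.
theorem card_insert_erase (s : Finset Char) (a : Char) :
    (insert a s).card = (s.erase a).card + 1 := by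
  by_cases h : a ∈ s
  · rw [Finset.insert_eq_self.mpr h, ← Finset.card_erase_add_one h]
  · rw [Finset.card_insert_of_notMem h, Finset.erase_eq_of_notMem h]

-- B's run-count loop on a sorted tail, with the previous element below everything remaining.
theorem foldB_some (l : List Char) (c : Int) (p : Char)
    (hs : l.Pairwise (· ≤ ·)) (hp : ∀ x ∈ l, p ≤ x) :
    (l.foldl (fun (st : Int × Option Char) c =>
        if some c ≠ st.2 then (st.1 + 1, some c) else st) (c, some p)).1
      = c + ((l.toFinset.erase p).card : Int) := by
  induction l generalizing c p with
  | nil => simp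
  | cons a t ih =>
    have hta : ∀ x ∈ t, a ≤ x := fun x hx => (List.pairwise_cons.mp hs).1 x hx
    by_cases hap : a = p
    · subst hap
      rw [List.foldl_cons, if_neg (by simp : ¬(some a ≠ some a))]
      rw [ih c a (List.pairwise_cons.mp hs).2 hta]
      have : ((a :: t).toFinset.erase a) = t.toFinset.erase a := by
        simp [List.toFinset_cons, Finset.erase_insert_eq_erase]
      rw [this]
    · rw [List.foldl_cons, if_pos (by simp [hap] : (some a ≠ some p))]
      rw [ih (c + 1) a (List.pairwise_cons.mp hs).2 hta]
      have hpa : p ≤ a := hp a (List.mem_cons_self ..)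
      have hpt : p ∉ t.toFinset := by
        intro hmem
        rw [List.mem_toFinset] at hmem
        exact hap (le_antisymm (hta p hmem) hpa)
      have hpe : ((a :: t).toFinset.erase p) = insert a t.toFinset := by
        rw [List.toFinset_cons, Finset.erase_eq_of_notMem]
        simp [hap, hpt, Ne.symm]
      rw [hpe, card_insert_erase]
      push_cast
      ring

-- B's run-count loop from the start: it counts the distinct elements of a sorted list.
theorem foldB_none (l : List Char) (hs : l.Pairwise (· ≤ ·)) :
    (l.foldl (fun (st : Int × Option Char) c =>
        if some c ≠ st.2 then (st.1 + 1, some c) else st) ((0 : Int), (none : Option Char))).1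
      = (l.toFinset.card : Int) := by
  cases l with
  | nil => simp
  | cons a t =>
    rw [List.foldl_cons, if_pos (by simp : (some a ≠ (none : Option Char)))]
    rw [foldB_some t (0 + 1) a (List.pairwise_cons.mp hs).2
      (fun x hx => (List.pairwise_cons.mp hs).1 x hx)]
    rw [List.toFinset_cons, card_insert_erase]
    push_cast
    ring

-- ===== VERDICT (by name: the statement is the Claim_ definition above) =====
theorem k_distinct_spec : Claim_equal_k_distinct := by
  intro string k _
  unfold Spec_k_distinct
  simp only [k_distinct, k_distinct_alt]
  set l := PySem.Chars.lower string.toList with hl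
  have hA := foldA_spec l [] (by simp)
  have hperm : (PySem.List.sorted l (fun c => c) false).Perm l := PySem.List.sorted_perm ..
  have hpw : (PySem.List.sorted l (fun c => c) false).Pairwise (· ≤ ·) :=
    PySem.List.sorted_pairwise ..
  have hB := foldB_none (PySem.List.sorted l (fun c => c) false) hpw
  rw [hB, List.toFinset_eq_of_perm _ _ hperm]
  have hlen : (l.foldl (fun u i => if i ∈ u then u else u ++ [i]) ([] : List Char)).length
      = l.toFinset.card := by
    rw [← List.toFinset_card_of_nodup hA.1, hA.2]
    simp
  rw [hlen]
  cases h : (k == (l.toFinset.card : Int)) <;> simp_all
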